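-- pv_equiv track=rewrite | github.com/wangyendt/LeetCode | Contests/200-300/week 285/2212. Maximum Points in an Archery Competition/Maximum Points in an Archery Competition.py | maximumBobPoints
-- ===== SOURCE A (Python) =====
-- from typing import List
--
-- import functools
--
-- def maximumBobPoints(numArrows: int, aliceArrows: List[int]) -> List[int]:
--     @functools.lru_cache(None)
--     def dp(k, numArrows):
--         if k == 12 or numArrows <= 0:
--             return 0
--
--         maxScore = dp(k + 1, numArrows)  # Bob Lose
--         if numArrows > aliceArrows[k]:
--             maxScore = max(maxScore, dp(k + 1, numArrows - aliceArrows[k] - 1) + k)  # Bob Win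
--         return maxScore
--
--     # backtracking
--     ans = [0] * 12
--     remainBobArrows = numArrows
--     for k in range(12):
--         if dp(k, numArrows) != dp(k + 1, numArrows):  # If Bob win
--             ans[k] = aliceArrows[k] + 1
--             numArrows -= ans[k]
--             remainBobArrows -= ans[k]
--
--     ans[0] += remainBobArrows  # In case of having remain arrows then it means in all sections Bob always win
--     # then we can distribute the remain to any section, here we simple choose first section.
--     return ans
-- ===== SOURCE B (Python) =====
-- from typing import List
--
--
-- def maximumBobPoints(numArrows: int, aliceArrows: List[int]) -> List[int]:
--     # Brute force: enumerate all 2^12 win/lose patterns (lose listed before win,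
--     # earlier sections most significant, so the first optimum found is the one
--     # that prefers losing earlier sections, like A's reconstruction).
--     wins_list = [[]]
--     for _ in range(12):
--         wins_list = [[w] + c for w in (False, True) for c in wins_list]
--     best_score, best = -1, [False] * 12
--     for wins in wins_list:
--         sc = _score(wins, aliceArrows, numArrows)
--         if sc is not None and sc > best_score:
--             best_score, best = sc, wins
--     ans = [0] * 12
--     for k, w in enumerate(best):
--         if w:
--             ans[k] = aliceArrows[k] + 1
--     ans[0] += numArrows - sum(ans)
--     return ans
--
--
-- def _score(wins, aliceArrows, numArrows):
--     n, s = numArrows, 0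
--     for k, w in enumerate(wins):
--         if w:
--             if n > 0 and n > aliceArrows[k]:
--                 n -= aliceArrows[k] + 1
--                 s += k
--             else:
--                 return None
--     return s
-- ===== Notes on version B (the rewrite author's own statement) =====
-- stated objective: alternative
-- what changed: Replaces A's memoized top-down DP plus greedy backtracking reconstruction with a flat brute-force enumeration of all 2^12 win/lose patterns in lexicographic order (lose before win, earlier sections most significant), keeping the first pattern that strictly improves the score, which reproduces A's tie-breaking exactly.
import Mathlib
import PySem

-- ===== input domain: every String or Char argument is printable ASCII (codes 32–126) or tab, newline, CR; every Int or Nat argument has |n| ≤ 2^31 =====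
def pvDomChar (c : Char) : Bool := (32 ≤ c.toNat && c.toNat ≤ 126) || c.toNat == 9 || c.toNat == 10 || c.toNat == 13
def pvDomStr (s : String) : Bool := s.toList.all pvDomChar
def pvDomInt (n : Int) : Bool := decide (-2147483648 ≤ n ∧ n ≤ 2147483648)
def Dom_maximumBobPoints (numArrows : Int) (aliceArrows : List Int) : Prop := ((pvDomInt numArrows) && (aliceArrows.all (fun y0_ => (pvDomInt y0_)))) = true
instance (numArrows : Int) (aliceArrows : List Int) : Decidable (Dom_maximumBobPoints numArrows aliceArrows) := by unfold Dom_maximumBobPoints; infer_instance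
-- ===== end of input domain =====

-- B replaces A's memoized DP + greedy reconstruction by a flat enumeration of all
-- 2^12 win/lose patterns in lexicographic order (objective: alternative algorithm,
-- constant in numArrows; not measurably faster).

-- aliceArrows[k]; exact for k < aliceArrows.length, which Pre_ guarantees at every use
def aIdx (a : List Int) (k : Nat) : Int := (PySem.List.pyGet? a (k : Int)).getD 0

-- ===== PORT A =====
-- dp(k, n) of A, with explicit fuel 12 - k (the memoization does not change the value)
def dpGo (a : List Int) : Nat → Nat → Int → Int
  | 0, _, _ => 0
  | f+1, k, n =>
    if k = 12 ∨ n ≤ 0 then 0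
    else
      let lose := dpGo a f (k+1) n
      if aIdx a k < n then max lose (dpGo a f (k+1) (n - aIdx a k - 1) + (k : Int)) else lose

def dpA (a : List Int) (k : Nat) (n : Int) : Int := dpGo a (12 - k) k n

def maximumBobPoints (numArrows : Int) (aliceArrows : List Int) : List Int :=
  -- for k in range(12): backtracking over (ans, numArrows, remainBobArrows)
  let st := (List.range 12).foldl
    (fun (st : List Int × Int × Int) k =>
      if dpA aliceArrows k st.2.1 ≠ dpA aliceArrows (k+1) st.2.1 then
        let v := aIdx aliceArrows k + 1
        (st.1.set k v, st.2.1 - v, st.2.2 - v)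
      else st)
    (List.replicate 12 (0 : Int), numArrows, numArrows)
  st.1.set 0 ((PySem.List.pyGet? st.1 0).getD 0 + st.2.2)   -- ans[0] += remainBobArrows

-- ===== PORT B =====
-- _score(wins, aliceArrows, numArrows): the enumerate loop as structural recursion on wins
def scoreGo (a : List Int) : List Bool → Nat → Int → Int → Option Int
  | [], _, _, s => some s
  | w :: ws, k, n, s =>
    if w then
      if 0 < n ∧ aIdx a k < n then scoreGo a ws (k+1) (n - aIdx a k - 1) (s + (k : Int))
      else none
    else scoreGo a ws (k+1) n s

def maximumBobPoints_alt (numArrows : Int) (aliceArrows : List Int) : List Int :=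
  -- wins_list: all 2^12 patterns, built by 12 rounds of prepending False then True
  let winsList := (List.range 12).foldl
    (fun (L : List (List Bool)) _ => [false, true].flatMap (fun w => L.map (fun c => w :: c))) [[]]
  -- keep the first pattern that strictly improves the score
  let best := winsList.foldl
    (fun (acc : Int × List Bool) wins =>
      match scoreGo aliceArrows wins 0 numArrows 0 with
      | none => acc
      | some sc => if acc.1 < sc then (sc, wins) else acc)
    (-1, List.replicate 12 false)
  -- ans[k] = aliceArrows[k] + 1 on won sections
  let ans := (PySem.List.enumerate best.2 0).foldl
    (fun (ans : List Int) p => if p.2 then ans.set p.1.toNat (aIdx aliceArrows p.1.toNat + 1) else ans)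
    (List.replicate 12 (0 : Int))
  ans.set 0 ((PySem.List.pyGet? ans 0).getD 0 + (numArrows - ans.sum))

-- ===== PRECONDITION & SPEC =====
-- Python A raises IndexError exactly when numArrows > 0 and len(aliceArrows) < 12
-- (with numArrows ≤ 0 the list is never indexed); B raises there too.
def Pre_maximumBobPoints (numArrows : Int) (aliceArrows : List Int) : Prop :=
  numArrows ≤ 0 ∨ 12 ≤ aliceArrows.length
instance (numArrows : Int) (aliceArrows : List Int) : Decidable (Pre_maximumBobPoints numArrows aliceArrows) := by unfold Pre_maximumBobPoints; infer_instance

def pvWitness_maximumBobPoints : Int × List Int := (9, [1, 1, 0, 1, 0, 0, 2, 1, 0, 1, 2, 0])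

def Spec_maximumBobPoints (numArrows : Int) (aliceArrows : List Int) (out : List Int) : Prop := out = maximumBobPoints_alt numArrows aliceArrows
instance (numArrows : Int) (aliceArrows : List Int) (out : List Int) : Decidable (Spec_maximumBobPoints numArrows aliceArrows out) := by unfold Spec_maximumBobPoints; infer_instance

-- ===== CLAIM (what is proved, stated in full; the proofs are below) =====
def Claim_equal_maximumBobPoints : Prop := ∀ (numArrows : Int) (aliceArrows : List Int), Dom_maximumBobPoints numArrows aliceArrows → Pre_maximumBobPoints numArrows aliceArrows → Spec_maximumBobPoints numArrows aliceArrows (maximumBobPoints numArrows aliceArrows)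

-- ===== LEMMAS AND PROOFS =====

-- dp over the index window [k, k+m), without A's fuel bookkeeping
def dpR (a : List Int) : Nat → Nat → Int → Int
  | _, 0, _ => 0
  | k, m+1, n =>
    if n ≤ 0 then 0
    else
      let lose := dpR a (k+1) m n
      if aIdx a k < n then max lose (dpR a (k+1) m (n - aIdx a k - 1) + (k : Int)) else lose

-- the win/lose pattern A's greedy reconstruction selects on window [k, k+m)
def greR (a : List Int) : Nat → Nat → Int → List Bool
  | _, 0, _ => []
  | k, m+1, n =>
    if dpR a k (m+1) n ≠ dpR a (k+1) m n
    then true :: greR a (k+1) m (n - aIdx a k - 1)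
    else false :: greR a (k+1) m n

-- arrows spent by a pattern starting at section k
def costR (a : List Int) : Nat → List Bool → Int
  | _, [] => 0
  | k, w :: ws => (if w then aIdx a k + 1 else 0) + costR a (k+1) ws

-- writing the won sections into ans, starting at index k
def writeWins (a : List Int) : List Int → Nat → List Bool → List Int
  | ans, _, [] => ans
  | ans, k, w :: ws => writeWins a (if w then ans.set k (aIdx a k + 1) else ans) (k+1) ws

def allW : Nat → List (List Bool)
  | 0 => [[]]
  | m+1 => (allW m).map (false :: ·) ++ (allW m).map (true :: ·)

theorem allW_foldl (m : Nat) :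
    (List.range m).foldl
      (fun (L : List (List Bool)) _ => [false, true].flatMap (fun w => L.map (fun c => w :: c))) [[]]
    = allW m := by
  induction m with
  | zero => rfl
  | succ m ih => rw [List.range_succ, List.foldl_append, ih]; simp [allW, List.flatMap]

theorem dpR_nonpos (a : List Int) (k m : Nat) (n : Int) (h : n ≤ 0) : dpR a k m n = 0 := by
  cases m <;> simp [dpR, h]

theorem dpR_nonneg (a : List Int) (m : Nat) : ∀ k n, 0 ≤ dpR a k m n := by
  induction m with
  | zero => intro k n; simp [dpR]
  | succ m ih =>
    intro k n
    simp only [dpR]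
    split_ifs with h1 h2
    · omega
    · exact le_trans (ih (k+1) n) (le_max_left _ _)
    · exact ih (k+1) n

theorem greR_length (a : List Int) (m : Nat) : ∀ k n, (greR a k m n).length = m := by
  induction m with
  | zero => intro k n; simp [greR]
  | succ m ih => intro k n; simp only [greR]; split_ifs <;> simp [ih]

theorem dpGo_eq_dpR (a : List Int) (f : Nat) : ∀ k n, k + f ≤ 12 → dpGo a f k n = dpR a k f n := by
  induction f with
  | zero => intro k n _; rfl
  | succ f ih =>
    intro k n hk
    have hk12 : k ≠ 12 := by omega
    simp only [dpGo, dpR, hk12, false_or]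
    split_ifs with h1 h2 <;>
      simp [ih (k+1) n (by omega), ih (k+1) (n - aIdx a k - 1) (by omega)]

theorem dpA_eq_dpR (a : List Int) (k m : Nat) (n : Int) (h : k + m = 12) :
    dpA a k n = dpR a k m n := by
  have : 12 - k = m := by omega
  rw [dpA, this, dpGo_eq_dpR a m k n (by omega)]

-- structural equations for writeWins and costR
theorem writeWins_cons_true (a : List Int) (ans : List Int) (k : Nat) (ws : List Bool) :
    writeWins a ans k (true :: ws) = writeWins a (ans.set k (aIdx a k + 1)) (k+1) ws := by
  simp [writeWins]

theorem writeWins_cons_false (a : List Int) (ans : List Int) (k : Nat) (ws : List Bool) :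
    writeWins a ans k (false :: ws) = writeWins a ans (k+1) ws := by
  simp [writeWins]

theorem costR_cons_true (a : List Int) (k : Nat) (ws : List Bool) :
    costR a k (true :: ws) = (aIdx a k + 1) + costR a (k+1) ws := by simp [costR]

theorem costR_cons_false (a : List Int) (k : Nat) (ws : List Bool) :
    costR a k (false :: ws) = costR a (k+1) ws := by simp [costR]

-- the selection fold over all patterns picks exactly A's greedy pattern, with its score
theorem selection_main (a : List Int) (m : Nat) :
    ∀ (k : Nat) (n c s0 : Int) (w0 : List Bool) (h : List Bool → List Bool),
    (allW m).foldl
      (fun (acc : Int × List Bool) ws =>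
        match scoreGo a ws k n c with
        | none => acc
        | some sc => if acc.1 < sc then (sc, h ws) else acc)
      (s0, w0)
    = if s0 < dpR a k m n + c then (dpR a k m n + c, h (greR a k m n)) else (s0, w0) := by
  induction m with
  | zero =>
    intro k n c s0 w0 h
    simp [allW, scoreGo, dpR, greR]
  | succ m ih =>
    intro k n c s0 w0 h
    simp only [allW, List.foldl_append, List.foldl_map]
    have hfalse :
        (allW m).foldl
          (fun (acc : Int × List Bool) ws =>
            match scoreGo a (false :: ws) k n c with
            | none => acc
            | some sc => if acc.1 < sc then (sc, h (false :: ws)) else acc)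
          (s0, w0)
        = if s0 < dpR a (k+1) m n + c then (dpR a (k+1) m n + c, h (false :: greR a (k+1) m n)) else (s0, w0) := by
      simpa [scoreGo] using ih (k+1) n c s0 w0 (fun ws => h (false :: ws))
    rw [hfalse]
    by_cases hc : 0 < n ∧ aIdx a k < n
    · -- winning section k is possible
      have htrue :
          ∀ (acc : Int × List Bool),
          (allW m).foldl
            (fun (acc : Int × List Bool) ws =>
              match scoreGo a (true :: ws) k n c with
              | none => acc
              | some sc => if acc.1 < sc then (sc, h (true :: ws)) else acc)
            acc
          = if acc.1 < (dpR a (k+1) m (n - aIdx a k - 1) + (k : Int)) + c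
            then ((dpR a (k+1) m (n - aIdx a k - 1) + (k : Int)) + c, h (true :: greR a (k+1) m (n - aIdx a k - 1)))
            else acc := by
        intro acc
        have harr : dpR a (k+1) m (n - aIdx a k - 1) + (c + (k : Int))
            = (dpR a (k+1) m (n - aIdx a k - 1) + (k : Int)) + c := by ring
        have := ih (k+1) (n - aIdx a k - 1) (c + (k : Int)) acc.1 acc.2 (fun ws => h (true :: ws))
        rw [harr] at this
        simpa [scoreGo, hc] using this
      obtain ⟨L, hL⟩ : ∃ v, v = dpR a (k+1) m n := ⟨_, rfl⟩
      obtain ⟨W, hW⟩ : ∃ v, v = dpR a (k+1) m (n - aIdx a k - 1) + (k : Int) := ⟨_, rfl⟩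
      rw [← hL]
      simp only [← hW] at htrue
      have hdp : dpR a k (m+1) n = max L W := by
        rw [hL, hW]; simp [dpR, hc.2, show ¬ n ≤ 0 by omega]
      by_cases hWL : W ≤ L
      · have hmax : max L W = L := max_eq_left hWL
        have hgre : greR a k (m+1) n = false :: greR a (k+1) m n := by
          rw [greR, hdp, ← hL, hmax]; simp
        rw [hgre, hdp, hmax]
        by_cases hs : s0 < L + c
        · rw [if_pos hs, htrue, if_neg (show ¬ (L + c < W + c) by omega)]
        · rw [if_neg hs, htrue, if_neg (show ¬ (s0 < W + c) by omega)]
      · have hLW : L < W := by omega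
        have hmax : max L W = W := max_eq_right (le_of_lt hLW)
        have hgre : greR a k (m+1) n = true :: greR a (k+1) m (n - aIdx a k - 1) := by
          rw [greR, hdp, ← hL, hmax]; simp; omega
        rw [hgre, hdp, hmax]
        by_cases hs : s0 < L + c
        · rw [if_pos hs, htrue, if_pos (show L + c < W + c by omega),
            if_pos (show s0 < W + c by omega)]
        · rw [if_neg hs, htrue]
    · -- section k cannot be won: every pattern winning k is infeasible
      have htrue :
          ∀ (acc : Int × List Bool),
          (allW m).foldl
            (fun (acc : Int × List Bool) ws =>
              match scoreGo a (true :: ws) k n c with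
              | none => acc
              | some sc => if acc.1 < sc then (sc, h (true :: ws)) else acc)
            acc
          = acc := by
        intro acc
        have hnone : ∀ ws, scoreGo a (true :: ws) k n c = none := by
          intro ws; simp [scoreGo, hc]
        induction allW m generalizing acc with
        | nil => rfl
        | cons x xs ihl => simp only [List.foldl_cons, hnone x]; exact ihl acc
      rw [htrue]
      have hdp : dpR a k (m+1) n = dpR a (k+1) m n := by
        by_cases hn : n ≤ 0
        · rw [dpR_nonpos a k (m+1) n hn, dpR_nonpos a (k+1) m n hn]
        · have : ¬ aIdx a k < n := fun hlt => hc ⟨by omega, hlt⟩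
          simp [dpR, hn, this]
      have hgre : greR a k (m+1) n = false :: greR a (k+1) m n := by
        rw [greR]; simp [hdp]
      rw [hgre, hdp]

-- A's backtracking loop over [k, k+m) computes greedy pattern, budget and remain
theorem loopA (a : List Int) (m : Nat) :
    ∀ (k : Nat) (ans : List Int) (x y : Int), k + m = 12 →
    (List.range' k m).foldl
      (fun (st : List Int × Int × Int) k =>
        if dpA a k st.2.1 ≠ dpA a (k+1) st.2.1 then
          let v := aIdx a k + 1
          (st.1.set k v, st.2.1 - v, st.2.2 - v)
        else st)
      (ans, x, y)
    = (writeWins a ans k (greR a k m x),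
       x - costR a k (greR a k m x),
       y - costR a k (greR a k m x)) := by
  induction m with
  | zero => intro k ans x y _; simp [greR, writeWins, costR]
  | succ m ih =>
    intro k ans x y hk
    rw [List.range'_succ, List.foldl_cons]
    have hA1 : dpA a k x = dpR a k (m+1) x := dpA_eq_dpR a k (m+1) x hk
    have hA2 : dpA a (k+1) x = dpR a (k+1) m x := dpA_eq_dpR a (k+1) m x (by omega)
    by_cases hw : dpR a k (m+1) x ≠ dpR a (k+1) m x
    · have hgre : greR a k (m+1) x = true :: greR a (k+1) m (x - aIdx a k - 1) := by
        rw [greR]; simp [hw]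
      simp only [hA1, hA2, if_pos hw]
      have harg : x - (aIdx a k + 1) = x - aIdx a k - 1 := by ring
      rw [ih (k+1) (ans.set k (aIdx a k + 1)) (x - (aIdx a k + 1)) (y - (aIdx a k + 1)) (by omega),
        harg, hgre, writeWins_cons_true, costR_cons_true]
      simp only [sub_sub]
    · have hgre : greR a k (m+1) x = false :: greR a (k+1) m x := by
        rw [greR]; simp [hw]
      simp only [hA1, hA2, if_neg hw]
      rw [ih (k+1) ans x y (by omega), hgre, writeWins_cons_false, costR_cons_false]

-- B's enumerate fold is writeWins
theorem enumFold_eq_writeWins (a : List Int) (ws : List Bool) :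
    ∀ (k : Nat) (ans : List Int),
    (PySem.List.enumerate ws (k : Int)).foldl
      (fun (ans : List Int) p => if p.2 then ans.set p.1.toNat (aIdx a p.1.toNat + 1) else ans) ans
    = writeWins a ans k ws := by
  induction ws with
  | nil => intro k ans; simp [PySem.List.enumerate_nil, writeWins]
  | cons w ws ih =>
    intro k ans
    rw [PySem.List.enumerate_cons, List.foldl_cons]
    have : ((k : Int) + 1) = ((k + 1 : Nat) : Int) := by push_cast; ring
    rw [this, ih (k+1)]
    cases w <;> simp [writeWins]

theorem getD_eq_zero_of_set {ans : List Int} {k j : Nat} {v : Int}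
    (h : ∀ i, k ≤ i → ans.getD i 0 = 0) (hj : k + 1 ≤ j) : (ans.set k v).getD j 0 = 0 := by
  rw [List.getD, List.getElem?_set_ne (by omega)]
  exact h j (by omega)

theorem sum_set_of_zero (ans : List Int) (k : Nat) (v : Int)
    (hk : k < ans.length) (h0 : ans.getD k 0 = 0) : (ans.set k v).sum = ans.sum + v := by
  induction ans generalizing k with
  | nil => simp at hk
  | cons x xs ih =>
    cases k with
    | zero =>
      have hx : x = 0 := by simpa [List.getD] using h0
      subst hx
      simp only [List.set, List.sum_cons]
      ring
    | succ k =>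
      simp only [List.set, List.sum_cons]
      rw [ih k (by simpa using hk) (by simpa [List.getD] using h0)]
      ring

theorem writeWins_sum (a : List Int) (ws : List Bool) :
    ∀ (k : Nat) (ans : List Int), k + ws.length ≤ ans.length →
    (∀ i, k ≤ i → ans.getD i 0 = 0) →
    (writeWins a ans k ws).sum = ans.sum + costR a k ws := by
  induction ws with
  | nil => intro k ans _ _; simp [writeWins, costR]
  | cons w ws ih =>
    intro k ans hlen hz
    simp only [List.length_cons] at hlen
    cases w
    · rw [writeWins_cons_false, costR_cons_false,
        ih (k+1) ans (by omega) (fun i hi => hz i (by omega))]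
    · rw [writeWins_cons_true, costR_cons_true,
        ih (k+1) (ans.set k (aIdx a k + 1)) (by simp; omega)
          (fun i hi => getD_eq_zero_of_set hz hi),
        sum_set_of_zero ans k _ (by omega) (hz k le_rfl)]
      ring

-- ===== VERDICT (by name: the statement is the Claim_ definition above) =====
theorem maximumBobPoints_spec : Claim_equal_maximumBobPoints := by
  intro n a _ _
  show maximumBobPoints n a = maximumBobPoints_alt n a
  simp only [maximumBobPoints, maximumBobPoints_alt]
  rw [allW_foldl 12]
  have hsel : (allW 12).foldl
      (fun (acc : Int × List Bool) wins =>
        match scoreGo a wins 0 n 0 with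
        | none => acc
        | some sc => if acc.1 < sc then (sc, wins) else acc)
      (-1, List.replicate 12 false)
      = (dpR a 0 12 n + 0, greR a 0 12 n) := by
    have hh := selection_main a 12 0 n 0 (-1) (List.replicate 12 false) (fun ws => ws)
    rw [if_pos (by have := dpR_nonneg a 12 0 n; omega)] at hh
    exact hh
  rw [hsel]
  rw [List.range_eq_range']
  rw [loopA a 12 0 (List.replicate 12 (0 : Int)) n n rfl]
  have henum := enumFold_eq_writeWins a (greR a 0 12 n) 0 (List.replicate 12 (0 : Int))
  simp only [Nat.cast_zero] at henum
  rw [henum]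
  have hsum : (writeWins a (List.replicate 12 (0 : Int)) 0 (greR a 0 12 n)).sum
      = costR a 0 (greR a 0 12 n) := by
    rw [writeWins_sum a (greR a 0 12 n) 0 (List.replicate 12 (0 : Int))
        (by simp [greR_length])
        (by intro i _; rw [List.getD_eq_getElem?_getD, List.getElem?_replicate]; split <;> rfl)]
    simp
  rw [hsum]
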